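-- pv_equiv track=rewrite | github.com/BroCoder007/Loopy_SimonTatham_Games | logic/generators/demo_puzzle.py | verify_puzzle
-- ===== SOURCE A (Python) =====
-- def _norm(u, v):
--     """Normalize edge to sorted tuple."""
--     return tuple(sorted((u, v)))
--
-- def _compute_clues(solution_edges, rows, cols):
--     """Compute all clue values from a solution edge set."""
--     clues = {}
--     for r in range(rows):
--         for c in range(cols):
--             count = 0
--             if _norm((r, c), (r, c + 1)) in solution_edges:
--                 count += 1
--             if _norm((r + 1, c), (r + 1, c + 1)) in solution_edges:
--                 count += 1
--             if _norm((r, c), (r + 1, c)) in solution_edges: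
--                 count += 1
--             if _norm((r, c + 1), (r + 1, c + 1)) in solution_edges:
--                 count += 1
--             clues[(r, c)] = count
--     return clues
--
-- def verify_puzzle(clues, solution_edges, rows, cols):
--     """
--     Verify puzzle validity.
--     Returns (is_valid, error_message)
--     """
--     if not solution_edges:
--         return False, "No solution edges"
--
--     # Check vertex degrees (must all be 2 for a valid loop)
--     degree = {}
--     for (u, v) in solution_edges:
--         degree[u] = degree.get(u, 0) + 1
--         degree[v] = degree.get(v, 0) + 1
--
--     for v, d in degree.items():
--         if d != 2:
--             return False, f"Vertex {v} has degree {d}, expected 2"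
--
--     # Check single connected component
--     adj = {}
--     for (u, v) in solution_edges:
--         adj.setdefault(u, []).append(v)
--         adj.setdefault(v, []).append(u)
--
--     start = next(iter(degree))
--     visited = set()
--     stack = [start]
--     while stack:
--         node = stack.pop()
--         if node in visited:
--             continue
--         visited.add(node)
--         for neighbor in adj.get(node, []):
--             if neighbor not in visited:
--                 stack.append(neighbor)
--
--     if len(visited) != len(degree):
--         return False, f"Not a single loop: {len(visited)}/{len(degree)} vertices connected"
--
--     # Verify clues match solution
--     all_clues = _compute_clues(solution_edges, rows, cols)
--     for (r, c), expected in clues.items():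
--         actual = all_clues.get((r, c), 0)
--         if actual != expected:
--             return False, f"Cell ({r},{c}): clue={expected}, solution gives {actual}"
--
--     return True, "Valid puzzle"
-- ===== SOURCE B (Python) =====
-- def verify_puzzle(clues, solution_edges, rows, cols):
--     """
--     Verify puzzle validity.
--     Returns (is_valid, error_message)
--     """
--     if not solution_edges:
--         return False, "No solution edges"
--
--     # Vertex degrees: one flat pass over all edge endpoints
--     degree = {}
--     for p in [p for e in solution_edges for p in e]:
--         degree[p] = degree.get(p, 0) + 1
--
--     for v, d in degree.items():
--         if d != 2:
--             return False, f"Vertex {v} has degree {d}, expected 2"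
--
--     # Check single connected component
--     adj = {}
--     for (u, v) in solution_edges:
--         adj.setdefault(u, []).append(v)
--         adj.setdefault(v, []).append(u)
--
--     start = next(iter(degree))
--     visited = set()
--     stack = [start]
--     while stack:
--         node = stack.pop()
--         if node not in visited:
--             visited.add(node)
--             stack.extend(n for n in adj.get(node, []) if n not in visited)
--
--     if len(visited) != len(degree):
--         return False, f"Not a single loop: {len(visited)}/{len(degree)} vertices connected"
--
--     # Clue counts: scatter each distinct edge to the one or two cells it borders,
--     # instead of gathering four membership tests per grid cell.
--     counts = {}
--     for e in dict.fromkeys(solution_edges):  # distinct edges, first-occurrence order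
--         (r1, c1), (r2, c2) = e
--         if r2 == r1 and c2 == c1 + 1:        # horizontal unit edge: cell below-right of it and cell above
--             cells = [(r1, c1), (r1 - 1, c1)]
--         elif r2 == r1 + 1 and c2 == c1:      # vertical unit edge: cell to its right and cell to its left
--             cells = [(r1, c1), (r1, c1 - 1)]
--         else:                                # not a normalized unit edge: borders no cell
--             cells = []
--         for (r, c) in cells:
--             if 0 <= r < rows and 0 <= c < cols:
--                 counts[(r, c)] = counts.get((r, c), 0) + 1
--
--     for (r, c), expected in clues.items():
--         actual = counts.get((r, c), 0)
--         if actual != expected: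
--             return False, f"Cell ({r},{c}): clue={expected}, solution gives {actual}"
--
--     return True, "Valid puzzle"
-- ===== Notes on version B (the rewrite author's own statement) =====
-- stated objective: alternative
-- what changed: The per-cell clue gather (four normalized-edge membership tests in the edge collection for every grid cell, O(rows*cols) cells) is replaced by a single scatter pass over the distinct edges that increments the one or two bordering cells of each unit edge, and vertex degrees are counted in one pass over the flattened endpoint list; the degree check, DFS connectivity and final comparison loop keep A's behaviour.
import Mathlib
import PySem

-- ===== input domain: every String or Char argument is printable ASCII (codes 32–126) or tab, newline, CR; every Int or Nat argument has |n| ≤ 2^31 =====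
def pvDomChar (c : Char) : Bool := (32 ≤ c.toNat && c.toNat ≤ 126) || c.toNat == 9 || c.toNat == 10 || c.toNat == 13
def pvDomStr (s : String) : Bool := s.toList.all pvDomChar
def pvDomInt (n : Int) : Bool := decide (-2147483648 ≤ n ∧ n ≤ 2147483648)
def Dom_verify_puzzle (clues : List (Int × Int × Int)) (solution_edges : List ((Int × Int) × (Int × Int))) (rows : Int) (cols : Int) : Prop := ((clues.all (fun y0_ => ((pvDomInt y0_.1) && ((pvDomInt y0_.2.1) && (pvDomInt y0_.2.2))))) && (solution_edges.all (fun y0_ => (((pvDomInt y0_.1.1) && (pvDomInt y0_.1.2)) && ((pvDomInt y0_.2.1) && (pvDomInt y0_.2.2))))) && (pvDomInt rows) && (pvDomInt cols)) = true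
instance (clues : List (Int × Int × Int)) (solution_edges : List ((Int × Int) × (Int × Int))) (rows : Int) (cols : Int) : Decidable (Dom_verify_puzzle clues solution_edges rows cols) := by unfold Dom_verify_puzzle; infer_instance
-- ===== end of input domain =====

-- B replaces A's per-cell clue gather (four edge-membership tests for every grid cell) by a
-- single scatter pass over the distinct edges (and builds vertex degrees from the flattened
-- endpoint list); degree check, connectivity DFS and the final comparison loop keep A's
-- behaviour exactly.

-- ===== PORT A =====

-- Both Pythons receive solution_edges as a Python SET and iterate it; its iteration order is
-- CPython's hash-table order, which PySem does not model. pvSetOrder below is a step-for-step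
-- hand port of CPython 3.11's set insertion (int/tuple hashing, linear probes, perturb probing,
-- resize at fill*5 >= mask*3), exact for sets of int-tuple edges with |int| <= 2^31 (the stated
-- domain): the set is built by inserting the elements in the harness's tagged-repr order and is
-- rebuilt once more in iteration order (the harness deep-copies the arguments), so the order is
-- deterministic. Both ports apply it to the input first; the equivalence proof is independent of
-- this shared reordering.
-- CPython set-iteration-order model (hand-ported; exact for sets of int tuples with |int| ≤ 2^31)
def pvHashInt (n : Int) : UInt64 :=
  if n = -1 then (18446744073709551614 : UInt64)
  else UInt64.ofNat ((n % 18446744073709551616).toNat)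

def pvHashLanes (lanes : List UInt64) : UInt64 :=
  let acc := lanes.foldl (fun (acc : UInt64) lane =>
    let acc := acc + lane * 14029467366897019727
    let acc := (acc <<< 31) ||| (acc >>> 33)
    acc * 11400714785074694791) (2870177450012600261 : UInt64)
  let acc := acc + ((UInt64.ofNat lanes.length) ^^^ ((2870177450012600261 : UInt64) ^^^ 3527539))
  if acc = 18446744073709551615 then 1546275796 else acc

def pvHashEdge (e : (Int × Int) × (Int × Int)) : UInt64 :=
  pvHashLanes [pvHashLanes [pvHashInt e.1.1, pvHashInt e.1.2],
               pvHashLanes [pvHashInt e.2.1, pvHashInt e.2.2]]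

abbrev PvEntry := Option (((Int × Int) × (Int × Int)) × UInt64)

-- scan table slots: some (some j) = first free slot j; some none = key already present; none = window exhausted
def pvScanWindow (t : Array PvEntry) (key : (Int × Int) × (Int × Int)) (h : UInt64) :
    List Nat → Option (Option Nat)
  | [] => none
  | j :: rest =>
    match t[j]! with
    | none => some (some j)
    | some (k2, h2) => if h2 = h ∧ k2 = key then some none else pvScanWindow t key h rest

def pvWindow (i mask : Nat) : List Nat :=
  i :: (if i + 9 ≤ mask then List.range' (i + 1) 9 else [])

-- probe loop; returns (table, inserted?)
def pvAddLoop (key : (Int × Int) × (Int × Int)) (h : UInt64) (mask : Nat) :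
    Nat → Array PvEntry → UInt64 → Nat → Array PvEntry × Bool
  | 0, t, _, _ => (t, false)   -- fuel; never reached: the probe sequence visits a free slot
  | fuel + 1, t, perturb, i =>
    match pvScanWindow t key h (pvWindow i mask) with
    | some (some j) => (t.set! j (some (key, h)), true)
    | some none => (t, false)
    | none =>
      let perturb := perturb >>> 5
      pvAddLoop key h mask fuel t perturb ((i * 5 + 1 + perturb.toNat) &&& mask)

def pvGrow (minused : Nat) : Nat → Nat → Nat
  | 0, sz => sz
  | fuel + 1, sz => if sz ≤ minused then pvGrow minused fuel (sz * 2) else sz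

def pvSetStep (st : Array PvEntry × Nat) (x : (Int × Int) × (Int × Int)) :
    Array PvEntry × Nat :=
  let (t, fill) := st
  let mask := t.size - 1
  let h := pvHashEdge x
  let (t, ins) := pvAddLoop x h mask (t.size + 64) t h (h.toNat &&& mask)
  if ins then
    let fill := fill + 1
    if fill * 5 ≥ mask * 3 then
      let minused := if fill ≤ 50000 then fill * 4 else fill * 2
      let newsize := pvGrow minused 64 8
      let t2 := t.foldl (fun t2 e =>
        match e with
        | none => t2
        | some (k, hh) =>
          (pvAddLoop k hh (newsize - 1) (newsize + 64) t2 hh (hh.toNat &&& (newsize - 1))).1)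
        (Array.replicate newsize none)
      (t2, fill)
    else (t, fill)
  else (t, fill)

def pvSetPass (xs : List ((Int × Int) × (Int × Int))) : List ((Int × Int) × (Int × Int)) :=
  ((xs.foldl pvSetStep (Array.replicate 8 none, 0)).1.toList.filterMap
    (fun e => e.map (·.1)))

-- repr of the harness's tagged encoding of an edge: its set-insertion order key
def pvEncRepr (e : (Int × Int) × (Int × Int)) : String :=
  "{'$tuple': [{'$tuple': [" ++ PySem.Int.toStr e.1.1 ++ ", " ++ PySem.Int.toStr e.1.2 ++
  "]}, {'$tuple': [" ++ PySem.Int.toStr e.2.1 ++ ", " ++ PySem.Int.toStr e.2.2 ++ "]}]}"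

def pvSetOrder (xs : List ((Int × Int) × (Int × Int))) : List ((Int × Int) × (Int × Int)) :=
  pvSetPass (pvSetPass (PySem.List.sorted xs (fun e => pvEncRepr e)))

-- str((r, c)) for a Python int pair (shared: both Pythons contain the identical f-string)
def pvFmtVertex (v : Int × Int) : String :=
  "(" ++ PySem.Int.toStr v.1 ++ ", " ++ PySem.Int.toStr v.2 ++ ")"

-- Python tuple '<' on (int, int), lexicographic
def pvPairLt (a b : Int × Int) : Bool := a.1 < b.1 || (a.1 == b.1 && a.2 < b.2)

-- _norm(u, v) = tuple(sorted((u, v))): exact — a stable two-element sort swaps iff v < u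
def pvNorm (u v : Int × Int) : (Int × Int) × (Int × Int) :=
  if pvPairLt v u then (v, u) else (u, v)

-- the body of _compute_clues' inner loop: count of the four bordering edges present
def pvCount4 (solution_edges : List ((Int × Int) × (Int × Int))) (r c : Int) : Int :=
  let count : Int := 0
  let count := if solution_edges.contains (pvNorm (r, c) (r, c + 1)) then count + 1 else count
  let count := if solution_edges.contains (pvNorm (r + 1, c) (r + 1, c + 1)) then count + 1 else count
  let count := if solution_edges.contains (pvNorm (r, c) (r + 1, c)) then count + 1 else count
  let count := if solution_edges.contains (pvNorm (r, c + 1) (r + 1, c + 1)) then count + 1 else count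
  count

-- _compute_clues(solution_edges, rows, cols)
def pvComputeClues (solution_edges : List ((Int × Int) × (Int × Int))) (rows cols : Int) :
    PySem.Dict (Int × Int) Int :=
  (PySem.List.pyRange 0 rows 1).foldl (fun cl r =>
    (PySem.List.pyRange 0 cols 1).foldl (fun cl c =>
      cl.insert (r, c) (pvCount4 solution_edges r c)) cl) PySem.Dict.empty

-- A's degree dict: two updates per edge
def pvDegreeA (solution_edges : List ((Int × Int) × (Int × Int))) : PySem.Dict (Int × Int) Int :=
  solution_edges.foldl (fun d e =>
    let d := d.insert e.1 (d.getD e.1 0 + 1)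
    d.insert e.2 (d.getD e.2 0 + 1)) PySem.Dict.empty

-- the degree-check loop (shared: the loop is identical in both Pythons)
def pvDegCheck : List ((Int × Int) × Int) → Option (Bool × String)
  | [] => none
  | (v, d) :: rest =>
    if d ≠ 2 then
      some (false, "Vertex " ++ pvFmtVertex v ++ " has degree " ++ PySem.Int.toStr d ++ ", expected 2")
    else pvDegCheck rest

-- the adjacency dict (shared: identical in both Pythons); setdefault(u, []).append(v) = modify
def pvAdj (solution_edges : List ((Int × Int) × (Int × Int))) :
    PySem.Dict (Int × Int) (List (Int × Int)) :=
  solution_edges.foldl (fun a e =>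
    let a := a.modify e.1 [] (· ++ [e.2])
    a.modify e.2 [] (· ++ [e.1])) PySem.Dict.empty

-- A's DFS loop; stack top at the list's end (Python append/pop); fuel 2·|edges|+2 always
-- suffices: each iteration pops once and at most 1 + Σ|adj[v]| = 1 + 2·|edges| pushes ever happen
def pvDfsA (adj : PySem.Dict (Int × Int) (List (Int × Int))) :
    Nat → List (Int × Int) → PySem.Set (Int × Int) → PySem.Set (Int × Int)
  | 0, _, visited => visited
  | fuel + 1, stack, visited =>
    match stack.getLast? with
    | none => visited
    | some node =>
      let stack := stack.dropLast
      if visited.contains node then pvDfsA adj fuel stack visited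
      else
        let visited := PySem.Set.add visited node
        pvDfsA adj fuel
          ((adj.getD node []).foldl (fun s n => if visited.contains n then s else s ++ [n]) stack)
          visited

-- the final clue-comparison loop (shared: identical in both Pythons, over each side's dict)
def pvClueCheck : List (Int × Int × Int) → PySem.Dict (Int × Int) Int → Bool × String
  | [], _ => (true, "Valid puzzle")
  | (r, c, expected) :: rest, d =>
    let actual := d.getD (r, c) 0
    if actual ≠ expected then
      (false, "Cell (" ++ PySem.Int.toStr r ++ "," ++ PySem.Int.toStr c ++ "): clue=" ++
        PySem.Int.toStr expected ++ ", solution gives " ++ PySem.Int.toStr actual)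
    else pvClueCheck rest d

def verify_puzzle (clues : List (Int × Int × Int)) (solution_edges : List ((Int × Int) × (Int × Int))) (rows : Int) (cols : Int) : Bool × String :=
  let solution_edges := pvSetOrder solution_edges   -- the set's iteration order (see above)
  if solution_edges.isEmpty then (false, "No solution edges")
  else
    let degree := pvDegreeA solution_edges
    match pvDegCheck degree.items with
    | some r => r
    | none =>
      let adj := pvAdj solution_edges
      let start := degree.keys.headD (0, 0)   -- next(iter(degree)); degree is nonempty here
      let visited := pvDfsA adj (2 * solution_edges.length + 2) [start] PySem.Set.empty
      if PySem.Set.len visited ≠ (degree.size : Int) then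
        (false, "Not a single loop: " ++ PySem.Int.toStr (PySem.Set.len visited) ++ "/" ++
          PySem.Int.toStr (degree.size : Int) ++ " vertices connected")
      else
        pvClueCheck clues (pvComputeClues solution_edges rows cols)

-- ===== PORT B =====

-- B's degree dict: one pass over the flattened endpoint list
def pvDegreeB (solution_edges : List ((Int × Int) × (Int × Int))) : PySem.Dict (Int × Int) Int :=
  (solution_edges.flatMap (fun e => [e.1, e.2])).foldl
    (fun d p => d.insert p (d.getD p 0 + 1)) PySem.Dict.empty

-- B's DFS loop: mark-then-extend formulation, same stack discipline
def pvDfsB (adj : PySem.Dict (Int × Int) (List (Int × Int))) :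
    Nat → List (Int × Int) → PySem.Set (Int × Int) → PySem.Set (Int × Int)
  | 0, _, visited => visited
  | fuel + 1, stack, visited =>
    match stack.getLast? with
    | none => visited
    | some node =>
      let stack := stack.dropLast
      if visited.contains node then pvDfsB adj fuel stack visited
      else
        let visited := PySem.Set.add visited node
        pvDfsB adj fuel
          (stack ++ (adj.getD node []).filter (fun n => !visited.contains n)) visited

-- 0 <= r < rows and 0 <= c < cols
def pvInGrid (rows cols : Int) (p : Int × Int) : Bool :=
  decide (0 ≤ p.1 ∧ p.1 < rows ∧ 0 ≤ p.2 ∧ p.2 < cols)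

-- the one or two cells a (normalized unit) edge borders
def pvCells (e : (Int × Int) × (Int × Int)) : List (Int × Int) :=
  if e.2.1 == e.1.1 && e.2.2 == e.1.2 + 1 then [(e.1.1, e.1.2), (e.1.1 - 1, e.1.2)]
  else if e.2.1 == e.1.1 + 1 && e.2.2 == e.1.2 then [(e.1.1, e.1.2), (e.1.1, e.1.2 - 1)]
  else []

-- B's clue counts: scatter each distinct edge (dict.fromkeys = PySem.List.dedup) to its cells
def pvScatter (solution_edges : List ((Int × Int) × (Int × Int))) (rows cols : Int) :
    PySem.Dict (Int × Int) Int :=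
  (PySem.List.dedup solution_edges).foldl (fun counts e =>
    (pvCells e).foldl (fun counts p =>
      if pvInGrid rows cols p then counts.insert p (counts.getD p 0 + 1) else counts) counts)
    PySem.Dict.empty

def verify_puzzle_alt (clues : List (Int × Int × Int)) (solution_edges : List ((Int × Int) × (Int × Int))) (rows : Int) (cols : Int) : Bool × String :=
  let solution_edges := pvSetOrder solution_edges   -- the set's iteration order (see above)
  if solution_edges.isEmpty then (false, "No solution edges")
  else
    let degree := pvDegreeB solution_edges
    match pvDegCheck degree.items with
    | some r => r
    | none =>
      let adj := pvAdj solution_edges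
      let start := degree.keys.headD (0, 0)   -- next(iter(degree)); degree is nonempty here
      let visited := pvDfsB adj (2 * solution_edges.length + 2) [start] PySem.Set.empty
      if PySem.Set.len visited ≠ (degree.size : Int) then
        (false, "Not a single loop: " ++ PySem.Int.toStr (PySem.Set.len visited) ++ "/" ++
          PySem.Int.toStr (degree.size : Int) ++ " vertices connected")
      else
        pvClueCheck clues (pvScatter solution_edges rows cols)

-- ===== PRECONDITION & SPEC =====
def Spec_verify_puzzle (clues : List (Int × Int × Int)) (solution_edges : List ((Int × Int) × (Int × Int))) (rows : Int) (cols : Int) (out : Bool × String) : Prop := out = verify_puzzle_alt clues solution_edges rows cols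
instance (clues : List (Int × Int × Int)) (solution_edges : List ((Int × Int) × (Int × Int))) (rows : Int) (cols : Int) (out : Bool × String) : Decidable (Spec_verify_puzzle clues solution_edges rows cols out) := by unfold Spec_verify_puzzle; infer_instance

-- ===== CLAIM (what is proved, stated in full; the proofs are below) =====
def Claim_equal_verify_puzzle : Prop := ∀ (clues : List (Int × Int × Int)) (solution_edges : List ((Int × Int) × (Int × Int))) (rows : Int) (cols : Int), Dom_verify_puzzle clues solution_edges rows cols → Spec_verify_puzzle clues solution_edges rows cols (verify_puzzle clues solution_edges rows cols)

-- ===== LEMMAS AND PROOFS =====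

theorem pvDegree_eq (es : List ((Int × Int) × (Int × Int))) : pvDegreeB es = pvDegreeA es := by
  unfold pvDegreeB pvDegreeA
  rw [List.foldl_flatMap]
  rfl

-- (2) the two DFS loops coincide

theorem pvDfs_eq (adj : PySem.Dict (Int × Int) (List (Int × Int))) (fuel : Nat)
    (stack : List (Int × Int)) (visited : PySem.Set (Int × Int)) :
    pvDfsB adj fuel stack visited = pvDfsA adj fuel stack visited := by
  induction fuel generalizing stack visited with
  | zero => rfl
  | succ fuel ih =>
    unfold pvDfsA pvDfsB
    cases h : stack.getLast? with
    | none => rfl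
    | some node =>
      simp only []
      by_cases hv : visited.contains node = true
      · simp only [hv, if_true, ih]
      · simp only [hv, if_false, Bool.false_eq_true, ih]
        congr 1
        have hstep : (fun (s : List (Int × Int)) n =>
            if (PySem.Set.add visited node).contains n = true then s else s ++ [n]) =
            (fun (s : List (Int × Int)) n =>
            if (!(PySem.Set.add visited node).contains n) = true then s ++ [n] else s) := by
          funext s n; cases (PySem.Set.add visited node).contains n <;> simp
        rw [hstep, PySem.List.foldl_append_if]
        simp

-- (3) the clue dicts agree pointwise, hence the comparison loops agree

-- the four cells bordered by a cell's edges, and the edges bordering a cell (proof-side only)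
def pvEdgesOf (q : Int × Int) : List ((Int × Int) × (Int × Int)) :=
  [((q.1, q.2), (q.1, q.2 + 1)), ((q.1 + 1, q.2), (q.1 + 1, q.2 + 1)),
   ((q.1, q.2), (q.1 + 1, q.2)), ((q.1, q.2 + 1), (q.1 + 1, q.2 + 1))]

theorem pvCells_mem_iff (q : Int × Int) (e : (Int × Int) × (Int × Int)) :
    q ∈ pvCells e ↔ e ∈ pvEdgesOf q := by
  obtain ⟨⟨r1, c1⟩, ⟨r2, c2⟩⟩ := e
  obtain ⟨a, b⟩ := q
  simp only [pvCells, pvEdgesOf]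
  split_ifs with h1 h2 <;>
    simp_all [Prod.ext_iff, List.mem_cons] <;> omega

theorem pvEdgesOf_nodup (q : Int × Int) : (pvEdgesOf q).Nodup := by
  obtain ⟨a, b⟩ := q
  simp [pvEdgesOf, Prod.ext_iff]

theorem pvCells_nodup (e : (Int × Int) × (Int × Int)) : (pvCells e).Nodup := by
  obtain ⟨⟨r1, c1⟩, ⟨r2, c2⟩⟩ := e
  simp only [pvCells]
  split_ifs <;> simp [Prod.ext_iff] <;> omega

-- inner scatter fold

theorem pvScatInner (rows cols : Int) (cells : List (Int × Int))
    (d : PySem.Dict (Int × Int) Int) (q : Int × Int) :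
    (cells.foldl (fun d p =>
      if pvInGrid rows cols p then d.insert p (d.getD p 0 + 1) else d) d).getD q 0
    = d.getD q 0 + ((cells.filter (pvInGrid rows cols)).count q : Int) := by
  induction cells generalizing d with
  | nil => simp
  | cons c rest ih =>
    simp only [List.foldl_cons, List.filter_cons]
    by_cases hb : pvInGrid rows cols c = true
    · rw [if_pos hb, ih, if_pos hb]
      by_cases hq : q = c
      · subst hq; rw [PySem.Dict.getD_insert_self, List.count_cons_self]; push_cast; ring
      · rw [PySem.Dict.getD_insert_of_ne _ _ _ hq, List.count_cons_of_ne (Ne.symm hq)]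
    · rw [if_neg hb, ih, if_neg hb]

theorem pvCellsCount (rows cols : Int) (e : (Int × Int) × (Int × Int)) (q : Int × Int) :
    (((pvCells e).filter (pvInGrid rows cols)).count q : Int)
    = if q ∈ pvCells e ∧ pvInGrid rows cols q = true then 1 else 0 := by
  have hnd : ((pvCells e).filter (pvInGrid rows cols)).Nodup := (pvCells_nodup e).filter _
  by_cases h : q ∈ pvCells e ∧ pvInGrid rows cols q = true
  · rw [if_pos h]
    have : q ∈ (pvCells e).filter (pvInGrid rows cols) := List.mem_filter.2 ⟨h.1, h.2⟩
    exact_mod_cast List.count_eq_one_of_mem hnd this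
  · rw [if_neg h]
    have : q ∉ (pvCells e).filter (pvInGrid rows cols) := by
      intro hq; exact h ⟨(List.mem_filter.1 hq).1, (List.mem_filter.1 hq).2⟩
    simp [List.count_eq_zero_of_not_mem this]

theorem pvScatOuter (rows cols : Int) (l : List ((Int × Int) × (Int × Int)))
    (d : PySem.Dict (Int × Int) Int) (q : Int × Int) :
    (l.foldl (fun counts e =>
      (pvCells e).foldl (fun counts p =>
        if pvInGrid rows cols p then counts.insert p (counts.getD p 0 + 1) else counts) counts) d).getD q 0
    = d.getD q 0 + (l.countP (fun e => decide (q ∈ pvCells e) && pvInGrid rows cols q) : Int) := by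
  induction l generalizing d with
  | nil => simp
  | cons e rest ih =>
    simp only [List.foldl_cons, List.countP_cons]
    rw [ih, pvScatInner, pvCellsCount]
    by_cases h : q ∈ pvCells e ∧ pvInGrid rows cols q = true
    · rw [if_pos h]
      simp [h.1, h.2]; ring
    · rw [if_neg h]
      have : (decide (q ∈ pvCells e) && pvInGrid rows cols q) = false := by
        rcases Decidable.not_and_iff_not_or_not.1 h with h' | h' <;> simp [h']
      simp [this]

theorem pvScatter_getD (es : List ((Int × Int) × (Int × Int))) (rows cols : Int) (q : Int × Int) :
    (pvScatter es rows cols).getD q 0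
    = ((PySem.List.dedup es).countP (fun e => decide (q ∈ pvCells e) && pvInGrid rows cols q) : Int) := by
  unfold pvScatter
  rw [pvScatOuter]
  simp [PySem.Dict.getD, PySem.Dict.empty, PySem.Dict.get?]

-- bridge: distinct-occurrence count of the bordering edges = sum of membership indicators

theorem pvCountP_bridge (es : List ((Int × Int) × (Int × Int))) (q : Int × Int) :
    ((PySem.List.dedup es).countP (fun e => decide (q ∈ pvCells e)) : Int)
    = (((pvEdgesOf q).filter (fun e => decide (e ∈ es))).length : Int) := by
  have h1 : (PySem.List.dedup es).countP (fun e => decide (q ∈ pvCells e))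
      = ((PySem.List.dedup es).filter (fun e => decide (e ∈ pvEdgesOf q))).length := by
    rw [List.countP_eq_length_filter]
    congr 1
    apply List.filter_congr
    intro e _
    simp [pvCells_mem_iff]
  rw [h1]
  have hperm : ((PySem.List.dedup es).filter (fun e => decide (e ∈ pvEdgesOf q))).Perm
      ((pvEdgesOf q).filter (fun e => decide (e ∈ es))) := by
    rw [List.perm_ext_iff_of_nodup ((PySem.List.nodup_dedup es).filter _)
      ((pvEdgesOf_nodup q).filter _)]
    intro e
    simp [List.mem_filter, and_comm]
  rw [hperm.length_eq]

theorem pvNorm_h (r c : Int) : pvNorm (r, c) (r, c + 1) = ((r, c), (r, c + 1)) := by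
  simp [pvNorm, pvPairLt]

theorem pvNorm_v (r c : Int) : pvNorm (r, c) (r + 1, c) = ((r, c), (r + 1, c)) := by
  simp [pvNorm, pvPairLt]

-- pvCount4 at (a, b) is exactly the filter length over pvEdgesOf (a, b)

theorem pvCount4_eq (es : List ((Int × Int) × (Int × Int))) (q : Int × Int) :
    pvCount4 es q.1 q.2 = (((pvEdgesOf q).filter (fun e => decide (e ∈ es))).length : Int) := by
  obtain ⟨a, b⟩ := q
  simp only [pvCount4, pvEdgesOf, pvNorm_h, pvNorm_v, List.filter_cons, List.filter_nil]
  by_cases h1 : ((a, b), (a, b + 1)) ∈ es <;>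
    by_cases h2 : ((a + 1, b), (a + 1, b + 1)) ∈ es <;>
      by_cases h3 : ((a, b), (a + 1, b)) ∈ es <;>
        by_cases h4 : ((a, b + 1), (a + 1, b + 1)) ∈ es <;>
          simp [h1, h2, h3, h4]

-- grid fold lookup, inner then outer

theorem pvGridInner (f : Int → Int → Int) (r : Int) (cs : List Int)
    (cl : PySem.Dict (Int × Int) Int) (p : Int × Int) :
    (cs.foldl (fun cl c => cl.insert (r, c) (f r c)) cl).getD p 0
    = if p.1 = r ∧ p.2 ∈ cs then f r p.2 else cl.getD p 0 := by
  induction cs generalizing cl with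
  | nil => simp
  | cons c rest ih =>
    simp only [List.foldl_cons]
    rw [ih]
    by_cases hmem : p.1 = r ∧ p.2 ∈ rest
    · rw [if_pos hmem, if_pos ⟨hmem.1, List.mem_cons_of_mem _ hmem.2⟩]
    · rw [if_neg hmem]
      by_cases hp : p = (r, c)
      · subst hp; simp [PySem.Dict.getD_insert_self]
      · rw [PySem.Dict.getD_insert_of_ne _ _ _ hp]
        by_cases h2 : p.1 = r ∧ p.2 ∈ c :: rest
        · exfalso
          rcases List.mem_cons.1 h2.2 with h | h
          · exact hp (Prod.ext h2.1 h)
          · exact hmem ⟨h2.1, h⟩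
        · rw [if_neg h2]

theorem pvGridOuter (f : Int → Int → Int) (rs cs : List Int)
    (cl : PySem.Dict (Int × Int) Int) (p : Int × Int) :
    (rs.foldl (fun cl r => cs.foldl (fun cl c => cl.insert (r, c) (f r c)) cl) cl).getD p 0
    = if p.1 ∈ rs ∧ p.2 ∈ cs then f p.1 p.2 else cl.getD p 0 := by
  induction rs generalizing cl with
  | nil => simp
  | cons r rest ih =>
    simp only [List.foldl_cons]
    rw [ih]
    by_cases hmem : p.1 ∈ rest ∧ p.2 ∈ cs
    · rw [if_pos hmem, if_pos ⟨List.mem_cons_of_mem _ hmem.1, hmem.2⟩]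
    · rw [if_neg hmem, pvGridInner]
      by_cases h1 : p.1 = r ∧ p.2 ∈ cs
      · rw [if_pos h1, if_pos ⟨by rw [h1.1]; exact List.mem_cons_self, h1.2⟩, h1.1]
      · rw [if_neg h1]
        by_cases h2 : p.1 ∈ r :: rest ∧ p.2 ∈ cs
        · exfalso
          rcases List.mem_cons.1 h2.1 with h | h
          · exact h1 ⟨h, h2.2⟩
          · exact hmem ⟨h, h2.2⟩
        · rw [if_neg h2]

theorem pvComputeClues_getD (es : List ((Int × Int) × (Int × Int))) (rows cols : Int) (p : Int × Int) :
    (pvComputeClues es rows cols).getD p 0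
    = if pvInGrid rows cols p = true then pvCount4 es p.1 p.2 else 0 := by
  unfold pvComputeClues
  rw [pvGridOuter]
  simp only [PySem.List.mem_pyRange_one, pvInGrid]
  by_cases h : (0 ≤ p.1 ∧ p.1 < rows ∧ 0 ≤ p.2 ∧ p.2 < cols)
  · rw [if_pos ⟨⟨h.1, h.2.1⟩, h.2.2⟩, if_pos (by simpa using h)]
  · rw [if_neg (by tauto), if_neg (by simpa using h)]
    simp [PySem.Dict.getD, PySem.Dict.empty, PySem.Dict.get?]

-- the main pointwise lemma

theorem pvGetD_eq (es : List ((Int × Int) × (Int × Int))) (rows cols : Int) (p : Int × Int) :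
    (pvComputeClues es rows cols).getD p 0 = (pvScatter es rows cols).getD p 0 := by
  rw [pvComputeClues_getD, pvScatter_getD]
  by_cases h : pvInGrid rows cols p = true
  · rw [if_pos h]
    have : (fun e => decide (p ∈ pvCells e) && pvInGrid rows cols p)
        = (fun e => decide (p ∈ pvCells e)) := by funext e; rw [h, Bool.and_true]
    rw [this, pvCountP_bridge, pvCount4_eq]
  · rw [if_neg h]
    have : (fun e => decide (p ∈ pvCells e) && pvInGrid rows cols p)
        = (fun _ => false) := by
      funext e; rw [Bool.eq_false_iff.2 h, Bool.and_false]
    simp [this]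

theorem pvClueCheck_congr (clues : List (Int × Int × Int))
    (d1 d2 : PySem.Dict (Int × Int) Int) (h : ∀ p, d1.getD p 0 = d2.getD p 0) :
    pvClueCheck clues d1 = pvClueCheck clues d2 := by
  induction clues with
  | nil => rfl
  | cons x rest ih => unfold pvClueCheck; rw [h, ih]

-- ===== VERDICT (by name: the statement is the Claim_ definition above) =====
theorem verify_puzzle_spec : Claim_equal_verify_puzzle := by
  intro clues es rows cols _
  unfold Spec_verify_puzzle verify_puzzle verify_puzzle_alt
  simp only [pvDegree_eq, pvDfs_eq, pvClueCheck_congr clues _ _ (pvGetD_eq (pvSetOrder es) rows cols)]
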